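-- pv_equiv track=rewrite | github.com/StarBanana/aas-application | Application/t5.py | a2_ev
-- ===== SOURCE A (Python) =====
-- def a2_ev(input_shifts_e, input_lasts ,shifts_e,plength):
--     wrong_inputs_shifts_e = []
--     wrong_inputs_lasts = []
--     last = plength - 1
--     for k,in_shift, in_last in zip(range(0,len(input_shifts_e)),input_shifts_e,input_lasts):
--         last += shifts_e[k]
--         try:
--             if not int(input_shifts_e[k]) == shifts_e[k]:
--                 wrong_inputs_shifts_e.append(k+1)
--         except ValueError:
--             wrong_inputs_shifts_e.append(k+1)
--         try:
--             if not int(input_lasts[k]) == last: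
--                 wrong_inputs_lasts.append(k+1)
--         except ValueError:
--             wrong_inputs_lasts.append(k+1)
--     return (wrong_inputs_shifts_e,wrong_inputs_lasts)
-- ===== SOURCE B (Python) =====
-- def _ok(s, v):
--     try:
--         return int(s) == v
--     except ValueError:
--         return False
--
-- def a2_ev(input_shifts_e, input_lasts, shifts_e, plength):
--     n = min(len(input_shifts_e), len(input_lasts))
--     expected = []
--     tot = plength - 1
--     for s in shifts_e[:n]:
--         tot += s
--         expected.append(tot)
--     wrong_shifts = [k + 1 for k in range(n) if not _ok(input_shifts_e[k], shifts_e[k])]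
--     wrong_lasts = [k + 1 for k in range(n) if not _ok(input_lasts[k], expected[k])]
--     return (wrong_shifts, wrong_lasts)
-- ===== Notes on version B (the rewrite author's own statement) =====
-- stated objective: alternative
-- what changed: A's single fused loop that interleaves a running `last` accumulator with both validity checks is replaced by first building the expected-lasts table as a prefix sum of shifts_e and then two independent comprehension passes collecting the 1-based mismatch indices.
import Mathlib
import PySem

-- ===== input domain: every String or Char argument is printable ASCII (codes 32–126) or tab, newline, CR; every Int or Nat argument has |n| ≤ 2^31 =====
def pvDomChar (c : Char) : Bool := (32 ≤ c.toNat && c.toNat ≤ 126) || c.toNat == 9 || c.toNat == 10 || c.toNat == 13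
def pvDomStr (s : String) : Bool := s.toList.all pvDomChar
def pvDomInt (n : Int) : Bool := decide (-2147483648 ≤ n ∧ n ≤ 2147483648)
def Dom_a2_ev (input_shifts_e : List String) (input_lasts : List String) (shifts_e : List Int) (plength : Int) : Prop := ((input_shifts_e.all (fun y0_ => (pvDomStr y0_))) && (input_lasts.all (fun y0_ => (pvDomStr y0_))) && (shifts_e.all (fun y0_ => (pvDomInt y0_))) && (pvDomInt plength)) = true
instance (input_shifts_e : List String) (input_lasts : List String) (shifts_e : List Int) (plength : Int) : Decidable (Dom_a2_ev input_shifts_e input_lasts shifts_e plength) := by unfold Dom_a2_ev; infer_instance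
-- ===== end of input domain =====

-- B replaces A's single fused loop (running `last` accumulator interleaved with both checks) by a
-- precomputed prefix-sum table of expected lasts plus two independent comprehension passes (objective: alternative).

-- ===== PORT A =====
-- literal port: the for-loop over zip(range(len(input_shifts_e)), input_shifts_e, input_lasts) is a foldl
-- over that zip; indexing xs[k] is PySem.List.pyGet? (the `.getD` default is only reached where Python would
-- raise IndexError, i.e. outside Pre_a2_ev).
def a2_ev_step (input_shifts_e : List String) (input_lasts : List String) (shifts_e : List Int) (acc : List Int × List Int × Int) (k : Nat) : List Int × List Int × Int :=
  let last := acc.2.2 + (PySem.List.pyGet? shifts_e (k : Int)).getD 0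
  let ws :=
    match PySem.Int.ofStr? ((PySem.List.pyGet? input_shifts_e (k : Int)).getD "") with
    | some v => if v = (PySem.List.pyGet? shifts_e (k : Int)).getD 0 then acc.1 else acc.1 ++ [(k : Int) + 1]
    | none => acc.1 ++ [(k : Int) + 1]
  let wl :=
    match PySem.Int.ofStr? ((PySem.List.pyGet? input_lasts (k : Int)).getD "") with
    | some v => if v = last then acc.2.1 else acc.2.1 ++ [(k : Int) + 1]
    | none => acc.2.1 ++ [(k : Int) + 1]
  (ws, wl, last)

def a2_ev (input_shifts_e : List String) (input_lasts : List String) (shifts_e : List Int) (plength : Int) : List Int × List Int :=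
  let r := ((List.range input_shifts_e.length).zip (input_shifts_e.zip input_lasts)).foldl
      (fun acc t => a2_ev_step input_shifts_e input_lasts shifts_e acc t.1) ([], [], plength - 1)
  (r.1, r.2.1)

-- ===== PORT B =====
-- B's helper _ok(s, v): int(s) == v, False on ValueError
def pvOk (s : String) (v : Int) : Bool :=
  match PySem.Int.ofStr? s with
  | some w => w == v
  | none => false

def a2_ev_alt (input_shifts_e : List String) (input_lasts : List String) (shifts_e : List Int) (plength : Int) : List Int × List Int :=
  let n := min input_shifts_e.length input_lasts.length
  let expected := ((PySem.List.slice shifts_e (some 0) (some (n : Int))).foldl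
      (fun (acc : List Int × Int) s => (acc.1 ++ [acc.2 + s], acc.2 + s)) ([], plength - 1)).1
  let wrong_shifts := (List.range n).filterMap (fun (k : Nat) =>
    if pvOk ((PySem.List.pyGet? input_shifts_e (k : Int)).getD "") ((PySem.List.pyGet? shifts_e (k : Int)).getD 0)
    then none else some ((k : Int) + 1))
  let wrong_lasts := (List.range n).filterMap (fun (k : Nat) =>
    if pvOk ((PySem.List.pyGet? input_lasts (k : Int)).getD "") ((PySem.List.pyGet? expected (k : Int)).getD 0)
    then none else some ((k : Int) + 1))
  (wrong_shifts, wrong_lasts)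

-- ===== PRECONDITION & SPEC =====
-- Pre_ excludes exactly the inputs on which A raises IndexError: shifts_e shorter than the zipped input lists.
def Pre_a2_ev (input_shifts_e : List String) (input_lasts : List String) (shifts_e : List Int) (plength : Int) : Prop :=
  min input_shifts_e.length input_lasts.length ≤ shifts_e.length
instance (input_shifts_e : List String) (input_lasts : List String) (shifts_e : List Int) (plength : Int) : Decidable (Pre_a2_ev input_shifts_e input_lasts shifts_e plength) := by unfold Pre_a2_ev; infer_instance

def pvWitness_a2_ev : List String × List String × List Int × Int := (["2", "x"], ["4", "9"], [2, 3], 3)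

def Spec_a2_ev (input_shifts_e : List String) (input_lasts : List String) (shifts_e : List Int) (plength : Int) (out : List Int × List Int) : Prop := out = a2_ev_alt input_shifts_e input_lasts shifts_e plength
instance (input_shifts_e : List String) (input_lasts : List String) (shifts_e : List Int) (plength : Int) (out : List Int × List Int) : Decidable (Spec_a2_ev input_shifts_e input_lasts shifts_e plength out) := by unfold Spec_a2_ev; infer_instance

-- ===== CLAIM (what is proved, stated in full; the proofs are below) =====
def Claim_equal_a2_ev : Prop := ∀ (input_shifts_e : List String) (input_lasts : List String) (shifts_e : List Int) (plength : Int), Dom_a2_ev input_shifts_e input_lasts shifts_e plength → Pre_a2_ev input_shifts_e input_lasts shifts_e plength → Spec_a2_ev input_shifts_e input_lasts shifts_e plength (a2_ev input_shifts_e input_lasts shifts_e plength)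

-- ===== LEMMAS AND PROOFS =====

-- the match A performs on int(s) is B's boolean helper
theorem pvMatch_eq_ok (s : String) (v : Int) (acc : List Int) (y : Int) :
    (match PySem.Int.ofStr? s with
      | some w => if w = v then acc else acc ++ [y]
      | none => acc ++ [y]) = if pvOk s v then acc else acc ++ [y] := by
  unfold pvOk
  cases h : PySem.Int.ofStr? s with
  | none => simp
  | some w => by_cases hw : w = v <;> simp [hw]

-- first components of the zip A folds over are exactly range (min of the lengths)
theorem zip_range_fst {γ : Type} (a : Nat) (c : List γ) :
    ((List.range a).zip c).map Prod.fst = List.range (min a c.length) := by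
  apply List.ext_getElem
  · simp
  · intro i h1 h2
    simp

-- folding A's zip only consumes the indices: it is a fold over range (min of the lengths)
theorem foldl_zip_fst {γ δ : Type} (step' : δ → Nat → δ) (a : Nat) (c : List γ) (init : δ) :
    ((List.range a).zip c).foldl (fun acc t => step' acc t.1) init
      = (List.range (min a c.length)).foldl step' init := by
  conv_lhs => rw [← List.foldl_map]
  rw [zip_range_fst]

-- B's prefix-sum loop produces the list of cumulative sums
theorem prefix_fold (L : List Int) (A : List Int) (i : Int) :
    L.foldl (fun (acc : List Int × Int) s => (acc.1 ++ [acc.2 + s], acc.2 + s)) (A, i)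
      = (A ++ (List.range L.length).map (fun (k : Nat) => i + (L.take (k + 1)).sum), i + L.sum) := by
  induction L generalizing A i with
  | nil => simp
  | cons x t ih =>
    rw [List.foldl_cons]
    show List.foldl _ (A ++ [i + x], i + x) t = _
    rw [ih (A ++ [i + x]) (i + x), List.length_cons, List.range_succ_eq_map]
    simp [List.map_map, Function.comp, add_assoc, List.append_assoc]

-- the heart: A's fused loop over range m equals B's two filterMap passes plus the running sum, for m within shifts_e
theorem fold_eq (input_shifts_e input_lasts : List String) (shifts_e : List Int) (plength : Int)
    (m : Nat) (hm : m ≤ shifts_e.length) :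
    (List.range m).foldl (a2_ev_step input_shifts_e input_lasts shifts_e) ([], [], plength - 1)
      = ((List.range m).filterMap (fun (k : Nat) =>
            if pvOk ((PySem.List.pyGet? input_shifts_e (k : Int)).getD "") ((PySem.List.pyGet? shifts_e (k : Int)).getD 0)
            then none else some ((k : Int) + 1)),
         (List.range m).filterMap (fun (k : Nat) =>
            if pvOk ((PySem.List.pyGet? input_lasts (k : Int)).getD "") (plength - 1 + (shifts_e.take (k + 1)).sum)
            then none else some ((k : Int) + 1)),
         plength - 1 + (shifts_e.take m).sum) := by
  induction m with
  | zero => simp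
  | succ m ih =>
    have hm' : m ≤ shifts_e.length := Nat.le_of_succ_le hm
    have hlt : m < shifts_e.length := hm
    rw [List.range_succ, List.foldl_append, List.filterMap_append, List.filterMap_append, ih hm']
    simp only [List.foldl_cons, List.foldl_nil, a2_ev_step]
    have hget : (PySem.List.pyGet? shifts_e (m : Int)).getD 0 = shifts_e[m] := by
      simp [pysem, hlt]
    rw [pvMatch_eq_ok, pvMatch_eq_ok]
    have hsum : (shifts_e.take (m + 1)).sum = (shifts_e.take m).sum + shifts_e[m] :=
      List.sum_take_succ _ _ hlt
    refine Prod.ext ?_ (Prod.ext ?_ ?_)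
    · simp [List.filterMap_cons]
      split_ifs <;> simp
    · simp only [hget, List.filterMap_cons, List.filterMap_nil, hsum]
      have : plength - 1 + (shifts_e.take m).sum + shifts_e[m] = plength - 1 + ((shifts_e.take m).sum + shifts_e[m]) := by ring
      rw [this]
      split_ifs <;> simp
    · simp [hsum, List.getElem?_eq_getElem hlt]; ring

-- ===== VERDICT (by name: the statement is the Claim_ definition above) =====
theorem a2_ev_spec : Claim_equal_a2_ev := by
  unfold Claim_equal_a2_ev
  intro A B S P _ hpre
  unfold Pre_a2_ev at hpre
  unfold Spec_a2_ev a2_ev a2_ev_alt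
  have hA := fold_eq A B S P (min A.length B.length) hpre
  have hslice : PySem.List.slice S (some 0) (some ((min A.length B.length : Nat) : Int))
      = S.take (min A.length B.length) := by
    rw [PySem.List.slice_zero_start, PySem.List.slice_to_natCast]
  have hexp : ((PySem.List.slice S (some 0) (some ((min A.length B.length : Nat) : Int))).foldl
        (fun (acc : List Int × Int) s => (acc.1 ++ [acc.2 + s], acc.2 + s)) ([], P - 1)).1
      = (List.range (min A.length B.length)).map
          (fun k => P - 1 + (S.take (k + 1)).sum) := by
    rw [hslice, prefix_fold]
    simp only [List.nil_append, List.length_take]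
    rw [show min (min A.length B.length) S.length = min A.length B.length by omega]
    apply List.map_congr_left
    intro k hk
    rw [List.mem_range] at hk
    rw [List.take_take, show min (k + 1) (min A.length B.length) = k + 1 by omega]
  simp only []
  rw [foldl_zip_fst (a2_ev_step A B S) A.length (A.zip B) ([], [], P - 1)]
  rw [List.length_zip, ← Nat.min_assoc, Nat.min_self, hA, hexp]
  refine Prod.ext rfl ?_
  simp only []
  apply List.filterMap_congr
  intro k hk
  rw [List.mem_range] at hk
  have : (PySem.List.pyGet? ((List.range (min A.length B.length)).map
      (fun k => P - 1 + (S.take (k + 1)).sum)) (k : Int)).getD 0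
      = P - 1 + (S.take (k + 1)).sum := by
    simp [pysem, hk]
  rw [this]
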